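-- pv_equiv track=rewrite | github.com/Jinnie-J/Algorithm-study | programmers/게임아이템.py | solution
-- ===== SOURCE A (Python) =====
-- from heapq import heappush, heappop
-- from collections import deque
--
-- def solution(healths, items):
--     healths.sort()
--     items = deque(sorted([(item[1], item[0], index+1) for index, item in enumerate(items)])) # 깎는 체력 순으로 정렬
--     answer = []
--     heap = []
--
--     for health in healths:
--         while items:
--             debuff, buff, index = items[0] # 가장 깎는 체력이 낮은 아이템
--             if health - debuff < 100:
--                 break
--             items.popleft()
--             heappush(heap, (-buff, index))
--
--         if heap:
--             buff, index = heappop(heap)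
--             answer.append(index)
--
--     return sorted(answer)
-- ===== SOURCE B (Python) =====
-- def solution(healths, items):
--     healths.sort()
--     pool = sorted((it[1], it[0], i + 1) for i, it in enumerate(items))
--     ptr = 0
--     available = []  # (buff, index) of usable items
--     answer = []
--     for health in healths:
--         while ptr < len(pool) and health - pool[ptr][0] >= 100:
--             available.append((pool[ptr][1], pool[ptr][2]))
--             ptr += 1
--         if available:
--             best = available[0]
--             for cand in available[1:]:
--                 if (-cand[0], cand[1]) < (-best[0], best[1]):
--                     best = cand
--             available.remove(best)
--             answer.append(best[1])
--     return sorted(answer)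
-- ===== Notes on version B (the rewrite author's own statement) =====
-- stated objective: simpler
-- what changed: Replaces the heapq priority queue and deque with a plain list of available items scanned linearly for the max-buff/min-index item (same tie-break), with a pointer advancing over the debuff-sorted item list instead of popping a deque.
import Mathlib
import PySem

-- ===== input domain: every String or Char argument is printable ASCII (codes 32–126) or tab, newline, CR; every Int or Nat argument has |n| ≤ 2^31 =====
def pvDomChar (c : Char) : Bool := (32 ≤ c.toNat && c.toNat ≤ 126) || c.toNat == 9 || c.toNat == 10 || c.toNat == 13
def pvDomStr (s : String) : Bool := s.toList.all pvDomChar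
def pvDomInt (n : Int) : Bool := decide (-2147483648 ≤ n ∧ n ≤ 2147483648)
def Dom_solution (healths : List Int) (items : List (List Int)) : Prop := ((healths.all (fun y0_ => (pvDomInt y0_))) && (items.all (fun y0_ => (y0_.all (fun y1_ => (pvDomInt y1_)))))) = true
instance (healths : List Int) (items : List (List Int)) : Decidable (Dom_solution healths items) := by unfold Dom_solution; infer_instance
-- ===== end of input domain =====

-- B replaces A's heapq priority queue with a plain list scanned linearly for the best item
-- (same max-buff / min-index tie-break) and a pointer instead of a deque; objective: simpler.
-- Both A and B sort `healths` in place (equivalence proved here is about the return value;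
-- the in-place sort side effect is identical in A and B).

-- ===== PORT A =====
-- shared preprocessing: sorted([(item[1], item[0], index+1) for index, item in enumerate(items)]).
-- The third tuple components (index+1) are strictly increasing in the enumerated list, so the
-- stable two-key sort `sorted2` by (debuff, buff) is exactly Python's lexicographic tuple sort here.
def pvPrep (items : List (List Int)) : List (Int × Int × Int) :=
  PySem.List.sorted2
    ((PySem.List.enumerate items).map
      (fun p => (PySem.List.pyGetD p.2 1 0, PySem.List.pyGetD p.2 0 0, p.1 + 1)))
    (fun t => t.1) (fun t => t.2.1)

-- lexicographic ≤ on the heap entries (-buff, index): the order heapq pops in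
def pvLeB (a b : Int × Int) : Bool := a.1 < b.1 || (a.1 == b.1 && a.2 ≤ b.2)

-- heappush into the heap, modelled as insertion keeping the list sorted (heappop = take the head,
-- exactly the minimum heapq would pop)
def heapInsert (x : Int × Int) : List (Int × Int) → List (Int × Int)
  | [] => [x]
  | y :: t => if pvLeB x y then x :: y :: t else y :: heapInsert x t

-- the inner `while items:` loop: move usable items from the deque into the heap
def pushA (health : Int) : List (Int × Int × Int) → List (Int × Int) → (List (Int × Int × Int) × List (Int × Int))
  | [], heap => ([], heap)
  | (d, b, i) :: rest, heap =>
      if health - d < 100 then ((d, b, i) :: rest, heap)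
      else pushA health rest (heapInsert (-b, i) heap)

-- the `for health in healths:` loop
def loopA : List Int → List (Int × Int × Int) → List (Int × Int) → List Int → List Int
  | [], _, _, ans => ans
  | health :: hs, its, heap, ans =>
      let r := pushA health its heap
      match r.2 with
      | [] => loopA hs r.1 [] ans
      | (_, i) :: t => loopA hs r.1 t (ans ++ [i])

def solution (healths : List Int) (items : List (List Int)) : List Int :=
  PySem.List.sorted (loopA (PySem.List.sorted healths (fun x => x) false) (pvPrep items) [] [])
    (fun x => x) false

-- ===== PORT B =====
-- strict comparison (-cand[0], cand[1]) < (-best[0], best[1]) used by B's linear scan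
def pvKeyLt (c b : Int × Int) : Bool := (-c.1 < -b.1) || (-c.1 == -b.1 && c.2 < b.2)

-- the pointer-advancing while loop: append usable items (buff, index) to `available`
def pushB (health : Int) (pool : List (Int × Int × Int)) (ptr : Nat) (avail : List (Int × Int)) :
    Nat × List (Int × Int) :=
  if h : ptr < pool.length ∧ 100 ≤ health - (pool.getD ptr (0, 0, 0)).1 then
    pushB health pool (ptr + 1)
      (avail ++ [((pool.getD ptr (0, 0, 0)).2.1, (pool.getD ptr (0, 0, 0)).2.2)])
  else (ptr, avail)
termination_by pool.length - ptr
decreasing_by omega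

-- the `for cand in available[1:]:` scan keeping the first minimum of the key
def bestOf (a0 : Int × Int) (l : List (Int × Int)) : Int × Int :=
  l.foldl (fun best cand => if pvKeyLt cand best then cand else best) a0

-- the `for health in healths:` loop of B
def loopB (pool : List (Int × Int × Int)) : List Int → Nat → List (Int × Int) → List Int → List Int
  | [], _, _, ans => ans
  | health :: hs, ptr, avail, ans =>
      let s := pushB health pool ptr avail
      match s.2 with
      | [] => loopB pool hs s.1 [] ans
      | a0 :: rest =>
          let best := bestOf a0 rest
          loopB pool hs s.1 ((a0 :: rest).erase best) (ans ++ [best.2])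

def solution_alt (healths : List Int) (items : List (List Int)) : List Int :=
  PySem.List.sorted (loopB (pvPrep items) (PySem.List.sorted healths (fun x => x) false) 0 [] [])
    (fun x => x) false

-- ===== PRECONDITION & SPEC =====
-- Pre_ excludes exactly the inputs where Python A raises IndexError: an item list with fewer
-- than two entries (item[1] / item[0] fail).  B raises there too.
def Pre_solution (healths : List Int) (items : List (List Int)) : Prop :=
  ∀ it ∈ items, 2 ≤ it.length
instance (healths : List Int) (items : List (List Int)) : Decidable (Pre_solution healths items) := by
  unfold Pre_solution; infer_instance

def pvWitness_solution : List Int × List (List Int) := ([150, 120], [[30, 5], [10, 100]])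

def Spec_solution (healths : List Int) (items : List (List Int)) (out : List Int) : Prop := out = solution_alt healths items
instance (healths : List Int) (items : List (List Int)) (out : List Int) : Decidable (Spec_solution healths items out) := by unfold Spec_solution; infer_instance

-- ===== CLAIM (what is proved, stated in full; the proofs are below) =====
def Claim_equal_solution : Prop := ∀ (healths : List Int) (items : List (List Int)), Dom_solution healths items → Pre_solution healths items → Spec_solution healths items (solution healths items)

-- ===== LEMMAS AND PROOFS =====

-- the key heapq orders by: f (buff, index) = (-buff, index)
def pvKey (x : Int × Int) : Int × Int := (-x.1, x.2)

theorem pvLeB_refl (a : Int × Int) : pvLeB a a = true := by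
  simp [pvLeB]

theorem pvLeB_total (a b : Int × Int) : pvLeB a b = true ∨ pvLeB b a = true := by
  simp [pvLeB]; omega

theorem pvLeB_trans {a b c : Int × Int} (h1 : pvLeB a b = true) (h2 : pvLeB b c = true) :
    pvLeB a c = true := by
  simp [pvLeB] at *; omega

theorem pvLeB_antisymm {a b : Int × Int} (h1 : pvLeB a b = true) (h2 : pvLeB b a = true) :
    a = b := by
  obtain ⟨a1, a2⟩ := a; obtain ⟨b1, b2⟩ := b
  simp [pvLeB] at *; omega

theorem pvKeyLt_iff (c b : Int × Int) :
    pvKeyLt c b = true ↔ ¬ pvLeB (pvKey b) (pvKey c) = true := by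
  obtain ⟨c1, c2⟩ := c; obtain ⟨b1, b2⟩ := b
  simp [pvKeyLt, pvLeB, pvKey]; omega

theorem heapInsert_perm (x : Int × Int) (l : List (Int × Int)) :
    (heapInsert x l).Perm (x :: l) := by
  induction l with
  | nil => simp [heapInsert]
  | cons y t ih =>
      simp only [heapInsert]
      split
      · exact List.Perm.refl _
      · exact (ih.cons y).trans (List.Perm.swap x y t)

theorem mem_heapInsert {z x : Int × Int} {l : List (Int × Int)}
    (h : z ∈ heapInsert x l) : z = x ∨ z ∈ l := by
  have := (heapInsert_perm x l).mem_iff.mp h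
  simpa using this

theorem heapInsert_pairwise (x : Int × Int) {l : List (Int × Int)}
    (h : l.Pairwise (fun a b => pvLeB a b = true)) :
    (heapInsert x l).Pairwise (fun a b => pvLeB a b = true) := by
  induction l with
  | nil => simp [heapInsert]
  | cons y t ih =>
      rw [List.pairwise_cons] at h
      simp only [heapInsert]
      split
      · rename_i hxy
        exact List.Pairwise.cons
          (by
            intro z hz
            rcases List.mem_cons.mp hz with hz | hz
            · subst hz; exact hxy
            · exact pvLeB_trans hxy (h.1 z hz))
          (List.Pairwise.cons h.1 h.2)
      · rename_i hxy
        have hyx : pvLeB y x = true := by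
          rcases pvLeB_total x y with h' | h'
          · exact absurd h' hxy
          · exact h'
        exact List.Pairwise.cons
          (by
            intro z hz
            rcases mem_heapInsert hz with hz | hz
            · subst hz; exact hyx
            · exact h.1 z hz)
          (ih h.2)

theorem bestOf_spec (l : List (Int × Int)) (a0 : Int × Int) :
    (bestOf a0 l = a0 ∨ bestOf a0 l ∈ l) ∧
      pvLeB (pvKey (bestOf a0 l)) (pvKey a0) = true ∧
      ∀ y ∈ l, pvLeB (pvKey (bestOf a0 l)) (pvKey y) = true := by
  induction l generalizing a0 with
  | nil => exact ⟨Or.inl rfl, pvLeB_refl _, by simp⟩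
  | cons c t ih =>
      by_cases hc : pvKeyLt c a0 = true
      · have hstep : bestOf a0 (c :: t) = bestOf c t := by simp [bestOf, hc]
        rw [hstep]
        obtain ⟨hmem, hle, hall⟩ := ih c
        have hca0 : pvLeB (pvKey c) (pvKey a0) = true := by
          rcases pvLeB_total (pvKey c) (pvKey a0) with h' | h'
          · exact h'
          · exact absurd h' ((pvKeyLt_iff c a0).mp hc)
        refine ⟨?_, pvLeB_trans hle hca0, ?_⟩
        · rcases hmem with h' | h'
          · exact Or.inr (by rw [h']; exact List.mem_cons_self)
          · exact Or.inr (List.mem_cons_of_mem _ h')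
        · intro y hy
          rcases List.mem_cons.mp hy with hy | hy
          · subst hy; exact hle
          · exact hall y hy
      · have hstep : bestOf a0 (c :: t) = bestOf a0 t := by simp [bestOf, hc]
        rw [hstep]
        obtain ⟨hmem, hle, hall⟩ := ih a0
        have ha0c : pvLeB (pvKey a0) (pvKey c) = true := by
          by_contra h'
          exact hc ((pvKeyLt_iff c a0).mpr h')
        refine ⟨?_, hle, ?_⟩
        · rcases hmem with h' | h'
          · exact Or.inl h'
          · exact Or.inr (List.mem_cons_of_mem _ h')
        · intro y hy
          rcases List.mem_cons.mp hy with hy | hy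
          · subst hy; exact pvLeB_trans hle ha0c
          · exact hall y hy

-- the push phases agree: A's remaining deque stays `pool.drop ptr`, A's heap stays a sorted
-- permutation of B's available list under pvKey
theorem push_eq (health : Int) (pool : List (Int × Int × Int)) :
    ∀ (rem : List (Int × Int × Int)) (ptr : Nat) (heap : List (Int × Int)) (avail : List (Int × Int)),
      pool.drop ptr = rem →
      heap.Perm (avail.map pvKey) →
      heap.Pairwise (fun a b => pvLeB a b = true) →
      (pushA health rem heap).1 = pool.drop (pushB health pool ptr avail).1 ∧
      (pushA health rem heap).2.Perm (((pushB health pool ptr avail).2).map pvKey) ∧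
      (pushA health rem heap).2.Pairwise (fun a b => pvLeB a b = true) := by
  intro rem
  induction rem with
  | nil =>
      intro ptr heap avail hd hperm hsort
      have hlen : pool.length ≤ ptr := by
        by_contra h
        have := List.drop_eq_nil_iff.mp hd
        omega
      rw [pushB, dif_neg (by omega)]
      exact ⟨by simp [pushA, hd], by simpa [pushA] using hperm, by simpa [pushA] using hsort⟩
  | cons hd0 rest ih =>
      obtain ⟨d, b, i⟩ := hd0
      intro ptr heap avail hd hperm hsort
      have hlt : ptr < pool.length := by
        by_contra h
        rw [List.drop_eq_nil_iff.mpr (by omega)] at hd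
        exact absurd hd (by simp)
      have hget : pool.getD ptr (0, 0, 0) = (d, b, i) := by
        have h1 : pool[ptr]? = some (d, b, i) := by
          rw [← List.head?_drop, hd]; rfl
        simp [List.getD_eq_getElem?_getD, h1]
      by_cases hcond : health - d < 100
      · rw [pushB, dif_neg (by rw [hget]; simp; omega)]
        simp only [pushA, if_pos hcond]
        exact ⟨hd.symm, hperm, hsort⟩
      · rw [pushB, dif_pos (by rw [hget]; exact ⟨hlt, by simp; omega⟩)]
        simp only [pushA, if_neg hcond]
        rw [hget]
        have hdrop : pool.drop (ptr + 1) = rest := by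
          rw [← List.tail_drop, hd]; rfl
        apply ih (ptr + 1) _ _ hdrop
        · refine (heapInsert_perm _ _).trans ?_
          refine (hperm.cons (-b, i)).trans ?_
          have : ((avail ++ [(b, i)]).map pvKey) = avail.map pvKey ++ [(-b, i)] := by
            simp [pvKey]
          rw [this]
          exact (List.perm_append_singleton _ _).symm
        · exact heapInsert_pairwise _ hsort

-- the main loops agree under the same invariant
theorem loop_eq (pool : List (Int × Int × Int)) :
    ∀ (hs : List Int) (ptr : Nat) (heap : List (Int × Int)) (avail : List (Int × Int)) (ans : List Int),
      heap.Perm (avail.map pvKey) →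
      heap.Pairwise (fun a b => pvLeB a b = true) →
      loopA hs (pool.drop ptr) heap ans = loopB pool hs ptr avail ans := by
  intro hs
  induction hs with
  | nil => intro ptr heap avail ans _ _; rfl
  | cons health hs ih =>
      intro ptr heap avail ans hperm hsort
      simp only [loopA, loopB]
      obtain ⟨h1, h2, h3⟩ := push_eq health pool (pool.drop ptr) ptr heap avail rfl hperm hsort
      set r := pushA health (pool.drop ptr) heap with hr
      set s := pushB health pool ptr avail with hsdef
      rw [h1]
      match hA : r.2, hB : s.2 with
      | [], [] => exact ih s.1 [] [] ans (List.Perm.refl _) (by simp)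
      | [], a0 :: restb =>
          rw [hA, hB] at h2
          exact absurd h2.length_eq (by simp)
      | (nb, idx) :: t, [] =>
          rw [hA, hB] at h2
          exact absurd h2.length_eq (by simp)
      | (nb, idx) :: t, a0 :: restb =>
          rw [hA] at h2 h3
          rw [hB] at h2
          obtain ⟨hmem, hle0, hall⟩ := bestOf_spec restb a0
          set best := bestOf a0 restb with hbest
          have hbestmem : best ∈ a0 :: restb := by
            rcases hmem with h' | h'
            · exact h' ▸ List.mem_cons_self
            · exact List.mem_cons_of_mem _ h'
          have hbestle : ∀ y ∈ a0 :: restb, pvLeB (pvKey best) (pvKey y) = true := by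
            intro y hy
            rcases List.mem_cons.mp hy with hy | hy
            · subst hy; exact hle0
            · exact hall y hy
          -- the heap's head is exactly pvKey best
          have hheadmem : (nb, idx) ∈ (a0 :: restb).map pvKey := h2.mem_iff.mp List.mem_cons_self
          obtain ⟨e, he, hfe⟩ := List.mem_map.mp hheadmem
          have h5 : pvLeB (pvKey best) (nb, idx) = true := hfe ▸ hbestle e he
          have h6 : pvLeB (nb, idx) (pvKey best) = true := by
            have : pvKey best ∈ (nb, idx) :: t :=
              h2.symm.mem_iff.mp (List.mem_map.mpr ⟨best, hbestmem, rfl⟩)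
            rcases List.mem_cons.mp this with h' | h'
            · rw [h']; exact pvLeB_refl _
            · exact (List.pairwise_cons.mp h3).1 _ h'
          have hhead : (nb, idx) = pvKey best := pvLeB_antisymm h6 h5
          have hidx : idx = best.2 := by
            have := congrArg Prod.snd hhead
            simpa [pvKey] using this
          have htperm : t.Perm (((a0 :: restb).erase best).map pvKey) := by
            have hp1 : (a0 :: restb).Perm (best :: (a0 :: restb).erase best) :=
              List.perm_cons_erase hbestmem
            have hp2 : ((a0 :: restb).map pvKey).Perm
                (pvKey best :: ((a0 :: restb).erase best).map pvKey) := by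
              simpa using hp1.map pvKey
            have := h2.trans hp2
            rw [hhead] at this
            exact this.cons_inv
          rw [hidx]
          exact ih s.1 t _ (ans ++ [best.2]) htperm (List.pairwise_cons.mp h3).2

-- ===== VERDICT (by name: the statement is the Claim_ definition above) =====
theorem solution_spec : Claim_equal_solution := by
  intro healths items _ _
  unfold Spec_solution solution solution_alt
  congr 1
  exact loop_eq (pvPrep items) (PySem.List.sorted healths (fun x => x) false) 0 [] [] []
    (by simp) (by simp)
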